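-- pv_equiv track=rewrite | github.com/amon1aco/lcc-2ano | 2º Semestre/Lab. Algoritmia 2/treino1.py | cruzamentos
-- ===== SOURCE A (Python) =====
-- def conta_ruas(ruas,letra):
--     r = 0
--
--     for i in range(len(ruas)):
--         if((ruas[i])[0] == letra): r +=1
--         elif((ruas[i])[-1] == letra): r+= 1
--     return r
--
-- def mostra_ruas(ruas):
--     retorna = []
--     for c in range(len(ruas)):
--         if (ruas[c])[0] not in retorna:
--             retorna.append((ruas[c])[0])
--         if (ruas[c])[-1] not in retorna:
--             retorna.append((ruas[c][-1]))
--     return retorna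
--
-- def cruzamentos(ruas):
--     retorna = []
--     list = mostra_ruas(ruas)
--     for i in range(len(list)):
--         caracter = list[i]
--         val = conta_ruas(ruas,caracter)
--         retorna.append((caracter,val))
--
--     retorna.sort(key = lambda x: x[0])
--     retorna.sort(key = lambda x: x[1])
--     return retorna
-- ===== SOURCE B (Python) =====
-- def cruzamentos(ruas):
--     counts = {}
--     for rua in ruas:
--         f = rua[0]
--         l = rua[-1]
--         counts[f] = counts.get(f, 0) + 1
--         if l != f:
--             counts[l] = counts.get(l, 0) + 1
--     return sorted(counts.items(), key=lambda p: (p[1], p[0]))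
-- ===== Notes on version B (the rewrite author's own statement) =====
-- stated objective: faster
-- what changed: Replaces A's three passes (collect distinct endpoint letters, then for each letter rescan all streets to count, then two stable sorts) by one pass that counts both endpoints of each street in a dict (last char counted only when it differs from the first) followed by a single sort on the (count, letter) tuple key.
import Mathlib
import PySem

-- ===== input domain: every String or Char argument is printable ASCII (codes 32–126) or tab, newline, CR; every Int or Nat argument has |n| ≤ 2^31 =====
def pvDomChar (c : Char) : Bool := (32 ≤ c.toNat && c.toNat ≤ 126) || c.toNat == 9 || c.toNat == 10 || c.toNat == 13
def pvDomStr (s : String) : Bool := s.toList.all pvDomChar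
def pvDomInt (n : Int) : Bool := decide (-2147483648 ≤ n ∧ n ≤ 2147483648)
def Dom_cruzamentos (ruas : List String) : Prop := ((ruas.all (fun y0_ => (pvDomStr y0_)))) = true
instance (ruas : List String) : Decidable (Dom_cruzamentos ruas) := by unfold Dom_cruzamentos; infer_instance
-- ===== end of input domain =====

-- B replaces A's per-letter rescan of all streets (and its two stable sorts) by a single counting
-- pass over the streets into a dict plus one sort on the (count, letter) tuple key.

-- shared primitive helpers: the 1-character strings rua[0] and rua[-1]
def pyFirst (s : String) : String :=
  match PySem.Str.pyGet? s 0 with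
  | some c => String.ofList [c]
  | none => ""

def pyLast (s : String) : String :=
  match PySem.Str.pyGet? s (-1) with
  | some c => String.ofList [c]
  | none => ""

-- ===== PORT A =====
def conta_ruas (ruas : List String) (letra : String) : Int :=
  (PySem.List.pyRange 0 (PySem.List.len ruas)).foldl (fun r i =>
    let s := PySem.List.pyGetD ruas i ""
    if pyFirst s = letra then r + 1
    else if pyLast s = letra then r + 1
    else r) 0

def mostra_ruas (ruas : List String) : List String :=
  (PySem.List.pyRange 0 (PySem.List.len ruas)).foldl (fun retorna i =>
    let s := PySem.List.pyGetD ruas i ""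
    let r1 := if pyFirst s ∉ retorna then retorna ++ [pyFirst s] else retorna
    if pyLast s ∉ r1 then r1 ++ [pyLast s] else r1) []

def cruzamentos (ruas : List String) : List (String × Int) :=
  let list := mostra_ruas ruas
  let retorna := (PySem.List.pyRange 0 (PySem.List.len list)).foldl (fun acc i =>
    let caracter := PySem.List.pyGetD list i ""
    let val := conta_ruas ruas caracter
    acc ++ [(caracter, val)]) []
  PySem.List.sorted (PySem.List.sorted retorna (fun x => x.1)) (fun x => x.2)

-- ===== PORT B =====
def cruzamentos_alt (ruas : List String) : List (String × Int) :=
  let counts := ruas.foldl (fun d rua =>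
    let f := pyFirst rua
    let l := pyLast rua
    let d1 := d.insert f (d.getD f 0 + 1)
    if l ≠ f then d1.insert l (d1.getD l 0 + 1) else d1) PySem.Dict.empty
  PySem.List.sorted2 counts.items (fun p => p.2) (fun p => p.1)

-- ===== PRECONDITION & SPEC =====
-- Pre_ excludes lists containing an empty street name, on which the Python A raises IndexError (rua[0]).
def Pre_cruzamentos (ruas : List String) : Prop := ∀ s ∈ ruas, s.toList ≠ []
instance (ruas : List String) : Decidable (Pre_cruzamentos ruas) := by unfold Pre_cruzamentos; infer_instance

def pvWitness_cruzamentos : List String := ["ab", "bc", "ca"]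

def Spec_cruzamentos (ruas : List String) (out : List (String × Int)) : Prop := out = cruzamentos_alt ruas
instance (ruas : List String) (out : List (String × Int)) : Decidable (Spec_cruzamentos ruas out) := by unfold Spec_cruzamentos; infer_instance

-- ===== CLAIM (what is proved, stated in full; the proofs are below) =====
def Claim_equal_cruzamentos : Prop := ∀ (ruas : List String), Dom_cruzamentos ruas → Pre_cruzamentos ruas → Spec_cruzamentos ruas (cruzamentos ruas)

-- ===== LEMMAS AND PROOFS =====

def pvDelta (c : String) (s : String) : Int :=
  if pyFirst s = c then 1 else if pyLast s = c then 1 else 0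
def pvCnt (ruas : List String) (c : String) : Int :=
  ruas.foldl (fun r s => r + pvDelta c s) 0
def pvM (ruas : List String) : List String :=
  ruas.foldl (fun acc s => PySem.Set.add (PySem.Set.add acc (pyFirst s)) (pyLast s)) []
def pvStep (d : PySem.Dict String Int) (rua : String) : PySem.Dict String Int :=
  let f := pyFirst rua
  let l := pyLast rua
  let d1 := d.insert f (d.getD f 0 + 1)
  if l ≠ f then d1.insert l (d1.getD l 0 + 1) else d1

lemma pvCnt_append (p : List String) (s : String) (c : String) :
    pvCnt (p ++ [s]) c = pvCnt p c + pvDelta c s := by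
  simp [pvCnt, List.foldl_append]

lemma pvM_append (p : List String) (s : String) :
    pvM (p ++ [s]) = PySem.Set.add (PySem.Set.add (pvM p) (pyFirst s)) (pyLast s) := by
  simp [pvM, List.foldl_append]

lemma pvM_nodup (ruas : List String) : (pvM ruas).Nodup := by
  induction ruas using List.reverseRecOn with
  | nil => simp [pvM]
  | append_singleton p s ih =>
      rw [pvM_append]
      exact PySem.Set.nodup_add _ _ (PySem.Set.nodup_add _ _ ih)

lemma pvCnt_zero (ruas : List String) (c : String) (h : c ∉ pvM ruas) : pvCnt ruas c = 0 := by
  induction ruas using List.reverseRecOn with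
  | nil => simp [pvCnt]
  | append_singleton p s ih =>
      rw [pvM_append, PySem.Set.mem_add] at h
      push_neg at h
      obtain ⟨h1, hl⟩ := h
      rw [PySem.Set.mem_add] at h1
      push_neg at h1
      obtain ⟨hM, hf⟩ := h1
      rw [pvCnt_append, ih hM]
      simp [pvDelta, Ne.symm hf, Ne.symm hl]

lemma insert_bump (d : PySem.Dict String Int) (M : List String) (g : String → Int) (x : String)
    (hd : d.items = M.map (fun c => (c, g c))) (hnd : M.Nodup) (hz : x ∉ M → g x = 0) :
    (d.insert x (d.getD x 0 + 1)).items
      = (PySem.Set.add M x).map (fun c => (c, g c + if c = x then 1 else 0)) := by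
  have hkeys : d.keys = M := by
    simp [PySem.Dict.keys, hd, List.map_map, Function.comp_def]
  have hcont : d.contains x = decide (x ∈ M) := by
    rw [PySem.Dict.contains_eq_decide_mem_keys, hkeys]
  by_cases hx : x ∈ M
  · have hget : d.getD x 0 = g x := by
      apply PySem.Dict.getD_of_mem_items (v := g x)
      · rw [hd]; exact List.mem_map.mpr ⟨x, hx, rfl⟩
      · rw [hkeys]; exact hnd
    rw [PySem.Dict.items_insert_of_contains _ _ (by simp [hcont, hx]), hd, hget]
    have haddx : PySem.Set.add M x = M := by
      simp [PySem.Set.add, PySem.Set.contains, hx]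
    rw [haddx, List.map_map]
    apply List.map_congr_left
    intro c hc
    by_cases hcx : c = x
    · subst hcx; simp
    · simp [Function.comp_def, hcx]
  · have hget : d.getD x 0 = 0 :=
      PySem.Dict.getD_of_not_contains _ _ (by simp [hcont, hx])
    rw [PySem.Dict.items_insert_of_not_contains _ _ (by simp [hcont, hx]), hd, hget]
    have haddx : PySem.Set.add M x = M ++ [x] := by
      simp [PySem.Set.add, PySem.Set.contains, hx]
    rw [haddx, List.map_append]
    congr 1
    · apply List.map_congr_left
      intro c hc
      have hcx : c ≠ x := fun h => hx (h ▸ hc)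
      simp [hcx]
    · simp [hz hx]


lemma items_fold (ruas : List String) :
    (ruas.foldl pvStep PySem.Dict.empty).items
      = (pvM ruas).map (fun c => (c, pvCnt ruas c)) := by
  induction ruas using List.reverseRecOn with
  | nil => simp [pvM, pvCnt, PySem.Dict.empty]
  | append_singleton p s ih =>
      rw [List.foldl_append, List.foldl_cons, List.foldl_nil, pvM_append]
      have hM : (pvM p).Nodup := pvM_nodup p
      have h1 := insert_bump (p.foldl pvStep PySem.Dict.empty) (pvM p) (pvCnt p)
        (pyFirst s) ih hM (pvCnt_zero p (pyFirst s))
      by_cases hlf : pyLast s = pyFirst s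
      · have haddff : PySem.Set.add (PySem.Set.add (pvM p) (pyFirst s)) (pyLast s)
            = PySem.Set.add (pvM p) (pyFirst s) := by
          simp only [hlf, PySem.Set.add, PySem.Set.contains]
          split_ifs with h h2 <;> simp_all [List.contains_iff_mem]
        rw [haddff]
        simp only [pvStep, hlf, ne_eq, not_true_eq_false, if_false, ite_self]
        rw [h1]
        apply List.map_congr_left
        intro c hc
        rw [pvCnt_append]
        by_cases hcf : c = pyFirst s <;> simp [pvDelta, hcf, hlf, eq_comm]
      · have hz2 : pyLast s ∉ PySem.Set.add (pvM p) (pyFirst s) →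
            pvCnt p (pyLast s) + (if pyLast s = pyFirst s then 1 else 0) = 0 := by
          intro h
          rw [PySem.Set.mem_add] at h
          push_neg at h
          rw [pvCnt_zero p (pyLast s) h.1]
          simp [hlf]
        have h2 := insert_bump ((p.foldl pvStep PySem.Dict.empty).insert (pyFirst s)
            ((p.foldl pvStep PySem.Dict.empty).getD (pyFirst s) 0 + 1))
          (PySem.Set.add (pvM p) (pyFirst s))
          (fun c => pvCnt p c + if c = pyFirst s then 1 else 0)
          (pyLast s) h1 (PySem.Set.nodup_add _ _ hM) hz2
        simp only [pvStep, ne_eq, hlf, not_false_eq_true, if_true]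
        rw [h2]
        apply List.map_congr_left
        intro c hc
        rw [pvCnt_append]
        by_cases hcf : c = pyFirst s <;> by_cases hcl : c = pyLast s <;>
          simp_all [pvDelta, eq_comm] <;> omega

lemma conta_eq (ruas : List String) (letra : String) :
    conta_ruas ruas letra = pvCnt ruas letra := by
  unfold conta_ruas pvCnt
  rw [PySem.List.foldl_pyRange_pyGetD ruas ""
    (fun r s => if pyFirst s = letra then r + 1 else if pyLast s = letra then r + 1 else r) 0
    (le_refl 0)]
  simp only [Int.toNat_zero, List.drop_zero]
  exact PySem.List.foldl_congr_mem ruas _ _ 0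
    (by intro acc x _; simp only [pvDelta]; split_ifs <;> omega)

lemma mostra_eq (ruas : List String) : mostra_ruas ruas = pvM ruas := by
  unfold mostra_ruas pvM
  rw [PySem.List.foldl_pyRange_pyGetD ruas ""
    (fun retorna s =>
      let r1 := if pyFirst s ∉ retorna then retorna ++ [pyFirst s] else retorna
      if pyLast s ∉ r1 then r1 ++ [pyLast s] else r1) []
    (le_refl 0)]
  simp only [Int.toNat_zero, List.drop_zero]
  refine PySem.List.foldl_congr_mem ruas _ _ [] ?_
  intro acc x _
  simp only [PySem.Set.add, PySem.Set.contains]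
  by_cases h1 : pyFirst x ∈ acc <;>
    by_cases h2 : pyLast x ∈ (if pyFirst x ∈ acc then acc else acc ++ [pyFirst x]) <;>
      simp_all [List.contains_iff_mem]

def pvS {α κ : Type} [LinearOrder κ] (key : α → κ) (r : α → α → Prop) : α → α → Prop :=
  fun a b => key a < key b ∨ (key a = key b ∧ r a b)

lemma pvS_key_le {α κ : Type} [LinearOrder κ] (key : α → κ) (r : α → α → Prop)
    {a b : α} (h : pvS key r a b) : key a ≤ key b := by
  rcases h with h | ⟨h, _⟩
  · exact le_of_lt h
  · exact le_of_eq h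

lemma pairwise_insertBy {α κ : Type} [LinearOrder κ] (key : α → κ) (r : α → α → Prop)
    (x : α) (ys : List α) (h : ys.Pairwise (pvS key r)) (hr : ∀ y ∈ ys, r y x) :
    (PySem.List.insertBy (fun a b => decide (key a < key b)) x ys).Pairwise (pvS key r) := by
  induction ys with
  | nil => simp [PySem.List.insertBy, pvS]
  | cons y t ih =>
      rw [List.pairwise_cons] at h
      simp only [PySem.List.insertBy]
      by_cases hxy : key x < key y
      · simp only [hxy, decide_true, if_true]
        refine List.Pairwise.cons ?_ (List.Pairwise.cons h.1 h.2)
        intro z hz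
        rcases List.mem_cons.mp hz with rfl | hz
        · exact Or.inl hxy
        · exact Or.inl (lt_of_lt_of_le hxy (pvS_key_le key r (h.1 z hz)))
      · simp only [hxy, decide_false, if_false]
        refine List.Pairwise.cons ?_ (ih h.2 (fun y hy => hr y (List.mem_cons_of_mem _ hy)))
        intro z hz
        rcases (PySem.List.mem_insertBy _ _ _ _).mp hz with rfl | hz
        · by_cases hyx : key y < key z
          · exact Or.inl hyx
          · exact Or.inr ⟨le_antisymm (not_lt.mp hxy) (not_lt.mp hyx), hr y (List.mem_cons_self)⟩
        · exact h.1 z hz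

lemma pairwise_sorted_stable_aux {α κ : Type} [LinearOrder κ] (key : α → κ) (r : α → α → Prop)
    (xs : List α) : ∀ (acc : List α), acc.Pairwise (pvS key r) →
    (∀ a ∈ acc, ∀ x ∈ xs, r a x) → xs.Pairwise r →
    (xs.foldl (fun acc x => PySem.List.insertBy (fun a b => decide (key a < key b)) x acc) acc).Pairwise (pvS key r) := by
  induction xs with
  | nil => intro acc h _ _; simpa using h
  | cons x t ih =>
      intro acc hacc hcross hxs
      rw [List.pairwise_cons] at hxs
      rw [List.foldl_cons]
      apply ih
      · exact pairwise_insertBy key r x acc hacc (fun a ha => hcross a ha x List.mem_cons_self)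
      · intro a ha z hz
        rcases (PySem.List.mem_insertBy _ _ _ _).mp ha with rfl | ha
        · exact hxs.1 z hz
        · exact hcross a ha z (List.mem_cons_of_mem _ hz)
      · exact hxs.2

lemma pairwise_sorted_stable {α κ : Type} [LinearOrder κ] (key : α → κ) (r : α → α → Prop)
    (xs : List α) (h : xs.Pairwise r) :
    (PySem.List.sorted xs key).Pairwise (pvS key r) := by
  rw [PySem.List.sorted_eq_foldl_insertBy]
  exact pairwise_sorted_stable_aux key r xs [] (by simp) (by simp) h

lemma sorted2_eq_sorted_lex {α κ₁ κ₂ : Type} [LinearOrder κ₁] [LinearOrder κ₂]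
    (xs : List α) (k1 : α → κ₁) (k2 : α → κ₂) :
    PySem.List.sorted2 xs k1 k2 = PySem.List.sorted xs (fun x => toLex (k1 x, k2 x)) := by
  rw [PySem.List.sorted_eq_foldl_insertBy]
  show List.foldl _ [] xs = _
  congr 1
  funext acc x
  congr 1
  funext a b
  show (decide (k1 a < k1 b) || !decide (k1 b < k1 a) && decide (k2 a < k2 b))
      = decide (toLex (k1 a, k2 a) < toLex (k1 b, k2 b))
  by_cases h1 : k1 a < k1 b
  · simp [h1, Prod.Lex.lt_iff]
  · by_cases h2 : k1 b < k1 a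
    · simp [h1, h2, Prod.Lex.lt_iff, ne_of_gt h2]
    · have he : k1 a = k1 b := le_antisymm (not_lt.mp h2) (not_lt.mp h1)
      simp [h1, h2, he, Prod.Lex.lt_iff]

-- the unsorted pair list both programs end up sorting
def pvL (ruas : List String) : List (String × Int) :=
  (pvM ruas).map (fun c => (c, pvCnt ruas c))

lemma cruz_A_eq (ruas : List String) :
    cruzamentos ruas
      = PySem.List.sorted (PySem.List.sorted (pvL ruas) (fun x => x.1)) (fun x => x.2) := by
  have hz : cruzamentos ruas
      = PySem.List.sorted (PySem.List.sorted
          (List.foldl (fun acc i =>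
            acc ++ [(PySem.List.pyGetD (mostra_ruas ruas) i "",
              conta_ruas ruas (PySem.List.pyGetD (mostra_ruas ruas) i ""))]) []
            (PySem.List.pyRange 0 (PySem.List.len (mostra_ruas ruas))))
          (fun x => x.1)) (fun x => x.2) := rfl
  rw [hz, PySem.List.foldl_pyRange_pyGetD (mostra_ruas ruas) ""
    (fun acc c => acc ++ [(c, conta_ruas ruas c)]) [] (le_refl 0)]
  simp only [Int.toNat_zero, List.drop_zero]
  rw [PySem.List.foldl_append_singleton_eq_map, mostra_eq]
  congr 2
  · simp only [List.nil_append]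
    apply List.map_congr_left
    intro c _
    rw [conta_eq]

lemma cruz_B_eq (ruas : List String) :
    cruzamentos_alt ruas = PySem.List.sorted2 (pvL ruas) (fun p => p.2) (fun p => p.1) := by
  have hz : cruzamentos_alt ruas
      = PySem.List.sorted2 (ruas.foldl pvStep PySem.Dict.empty).items
          (fun p => p.2) (fun p => p.1) := rfl
  rw [hz, items_fold ruas]
  rfl

-- ===== VERDICT (by name: the statement is the Claim_ definition above) =====
theorem cruzamentos_spec : Claim_equal_cruzamentos := by
  intro ruas _ _
  unfold Spec_cruzamentos
  rw [cruz_A_eq, cruz_B_eq, sorted2_eq_sorted_lex]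
  have hL : (pvL ruas).Pairwise (fun a b => a.1 ≠ b.1) := by
    apply List.pairwise_map.mpr
    exact (pvM_nodup ruas).imp (fun h => h)
  have hperm1 : (PySem.List.sorted (pvL ruas) (fun x : String × Int => x.1)).Perm (pvL ruas) :=
    PySem.List.sorted_perm _ _ _
  have hne1 : (PySem.List.sorted (pvL ruas) (fun x : String × Int => x.1)).Pairwise
      (fun a b => a.1 ≠ b.1) :=
    (List.Perm.pairwise_iff (fun h => h.symm) hperm1).mpr hL
  have hle1 := PySem.List.sorted_pairwise (pvL ruas) (fun x : String × Int => x.1)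
  have hlt1 : (PySem.List.sorted (pvL ruas) (fun x : String × Int => x.1)).Pairwise
      (fun a b => a.1 < b.1) :=
    (hle1.and hne1).imp (fun h => lt_of_le_of_ne h.1 h.2)
  have hst := pairwise_sorted_stable (fun x : String × Int => x.2)
    (fun a b => a.1 < b.1) _ hlt1
  have hlex : (PySem.List.sorted (PySem.List.sorted (pvL ruas) (fun x : String × Int => x.1))
      (fun x : String × Int => x.2)).Pairwise
      (fun a b => toLex (a.2, a.1) < toLex (b.2, b.1)) := by
    refine hst.imp (fun h => ?_)
    rw [Prod.Lex.lt_iff]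
    rcases h with h | ⟨h1, h2⟩
    · exact Or.inl h
    · exact Or.inr ⟨h1, h2⟩
  have hperm : (PySem.List.sorted (PySem.List.sorted (pvL ruas) (fun x : String × Int => x.1))
      (fun x : String × Int => x.2)).Perm (pvL ruas) :=
    (PySem.List.sorted_perm _ _ _).trans hperm1
  exact (PySem.List.sorted_eq_of_perm_of_pairwise_lt (pvL ruas) _
    (fun p : String × Int => toLex (p.2, p.1)) hperm hlex).symm
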